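-- pv_equiv track=rewrite | github.com/jedijarrus/softshelf | proxy/file_uploads.py | pick_default_entry
-- ===== SOURCE A (Python) =====
-- def pick_default_entry(entries: list[str]) -> str | None:
--     """
--     Heuristik für den wahrscheinlichsten Installer in einer Eintragsliste:
--       1. setup.exe / setup.msi (auf jeder Tiefe)
--       2. install(er).exe / install(er).msi
--       3. erste .exe (kürzester Pfad zuerst)
--       4. erste .msi (kürzester Pfad zuerst)
--       5. erster Eintrag überhaupt
--     """
--     if not entries:
--         return None
--
--     def basename_lower(p: str) -> str:
--         return p.rsplit("/", 1)[-1].lower()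
--
--     by_depth = lambda p: (p.count("/"), p.lower())
--
--     for p in sorted(entries, key=by_depth):
--         if basename_lower(p) in ("setup.exe", "setup.msi"):
--             return p
--     for p in sorted(entries, key=by_depth):
--         if basename_lower(p) in (
--             "install.exe", "installer.exe", "install.msi", "installer.msi",
--         ):
--             return p
--     exes = sorted(
--         [p for p in entries if p.lower().endswith(".exe")], key=by_depth
--     )
--     if exes:
--         return exes[0]
--     msis = sorted(
--         [p for p in entries if p.lower().endswith(".msi")], key=by_depth
--     )
--     if msis:
--         return msis[0]
--     return entries[0]
-- ===== SOURCE B (Python) =====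
-- def pick_default_entry(entries: list[str]) -> str | None:
--     # Single pass: rank every entry once, keep the first entry with the smallest rank.
--     if not entries:
--         return None
--
--     def rank(p: str) -> tuple[int, int, str]:
--         low = p.lower()
--         base = p.rsplit("/", 1)[-1].lower()
--         if base in ("setup.exe", "setup.msi"):
--             tier = 1
--         elif base in ("install.exe", "installer.exe", "install.msi", "installer.msi"):
--             tier = 2
--         elif low.endswith(".exe"):
--             tier = 3
--         elif low.endswith(".msi"):
--             tier = 4
--         else:
--             return (5, 0, "")  # no installer hint: all such entries tie, the scan keeps the first
--         return (tier, p.count("/"), low)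
--
--     best = entries[0]
--     bk = rank(best)
--     for p in entries[1:]:
--         k = rank(p)
--         if k < bk:
--             best, bk = p, k
--     return best
-- ===== Notes on version B (the rewrite author's own statement) =====
-- stated objective: faster
-- what changed: Replaces A's four passes (two stable sorts scanned for setup/install names, then two filter+sort passes for .exe/.msi) by a single scan that ranks each entry once with a (tier, depth, lowercased path) key and keeps the first entry with the minimal rank.
import Mathlib
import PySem

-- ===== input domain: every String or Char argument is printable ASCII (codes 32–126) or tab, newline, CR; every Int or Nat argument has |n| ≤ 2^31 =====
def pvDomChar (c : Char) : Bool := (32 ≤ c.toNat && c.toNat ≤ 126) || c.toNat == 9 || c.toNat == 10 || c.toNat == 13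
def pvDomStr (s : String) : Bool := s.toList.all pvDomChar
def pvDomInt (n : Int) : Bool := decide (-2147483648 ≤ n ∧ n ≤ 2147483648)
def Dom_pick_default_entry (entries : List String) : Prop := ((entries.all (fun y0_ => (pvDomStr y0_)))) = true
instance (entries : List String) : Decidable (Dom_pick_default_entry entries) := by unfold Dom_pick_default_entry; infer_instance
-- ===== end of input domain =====

-- B replaces A's four sorted-list passes by one linear scan ranking each entry once; return value only, no mutation.

-- ===== PORT A =====
-- shared string helpers (the very tests both Pythons perform)
-- hand port of p.rsplit("/", 1)[-1].lower(): the suffix after the last '/' (whole string if no '/'), lowercased; exact for the 1-char separator "/"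
def pvBaseLow (p : String) : String :=
  PySem.Str.lower (String.ofList ((p.toList.reverse.takeWhile (fun c => !(c == '/'))).reverse))
def pvDepth (p : String) : Nat := PySem.Str.count p "/"
def pvLow (p : String) : String := PySem.Str.lower p
def pvQ1 (p : String) : Bool := ["setup.exe", "setup.msi"].contains (pvBaseLow p)
def pvQ2 (p : String) : Bool := ["install.exe", "installer.exe", "install.msi", "installer.msi"].contains (pvBaseLow p)
def pvQ3 (p : String) : Bool := PySem.Str.endswith (pvLow p) ".exe"
def pvQ4 (p : String) : Bool := PySem.Str.endswith (pvLow p) ".msi"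

def pick_default_entry (entries : List String) : Option String :=
  match entries with
  | [] => none
  | x :: xs =>
    match (PySem.List.sorted2 (x :: xs) pvDepth pvLow).find? pvQ1 with
    | some p => some p
    | none =>
      match (PySem.List.sorted2 (x :: xs) pvDepth pvLow).find? pvQ2 with
      | some p => some p
      | none =>
        match PySem.List.sorted2 ((x :: xs).filter pvQ3) pvDepth pvLow with
        | p :: _ => some p
        | [] =>
          match PySem.List.sorted2 ((x :: xs).filter pvQ4) pvDepth pvLow with
          | p :: _ => some p
          | [] => some x

-- ===== PORT B =====
-- rank(p): a single (tier, depth, lowercased path) key per entry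
def pvRank (p : String) : Nat × Nat × String :=
  let low := pvLow p
  let base := pvBaseLow p
  if ["setup.exe", "setup.msi"].contains base then (1, pvDepth p, low)
  else if ["install.exe", "installer.exe", "install.msi", "installer.msi"].contains base then (2, pvDepth p, low)
  else if PySem.Str.endswith low ".exe" then (3, pvDepth p, low)
  else if PySem.Str.endswith low ".msi" then (4, pvDepth p, low)
  else (5, 0, "")

-- Python's tuple '<' (lexicographic), written out
def pvRankLt (a b : Nat × Nat × String) : Bool :=
  decide (a.1 < b.1) || (a.1 == b.1 && (decide (a.2.1 < b.2.1) || (a.2.1 == b.2.1 && decide (a.2.2 < b.2.2))))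

def pick_default_entry_alt (entries : List String) : Option String :=
  match entries with
  | [] => none
  | x :: xs =>
    some ((xs.foldl (fun bb p =>
      let k := pvRank p
      if pvRankLt k bb.2 then (p, k) else bb) (x, pvRank x)).1)

-- ===== PRECONDITION & SPEC =====
def Spec_pick_default_entry (entries : List String) (out : Option String) : Prop := out = pick_default_entry_alt entries
instance (entries : List String) (out : Option String) : Decidable (Spec_pick_default_entry entries out) := by unfold Spec_pick_default_entry; infer_instance

-- ===== CLAIM (what is proved, stated in full; the proofs are below) =====
def Claim_equal_pick_default_entry : Prop := ∀ (entries : List String), Dom_pick_default_entry entries → Spec_pick_default_entry entries (pick_default_entry entries)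

-- ===== LEMMAS AND PROOFS =====

-- lexicographic keys used by the proofs
def pvKey (p : String) : ℕ ×ₗ String := toLex (pvDepth p, pvLow p)
def pvKeyI (c : ℤ × String) : (ℕ ×ₗ String) ×ₗ ℤ := toLex (pvKey c.2, c.1)
def pvRkL (k : ℕ × ℕ × String) : ℕ ×ₗ (ℕ ×ₗ String) := toLex (k.1, toLex (k.2.1, k.2.2))
def pvR (p : String) : ℕ ×ₗ (ℕ ×ₗ String) := pvRkL (pvRank p)

-- "a is the first entry of l with minimal pvKey among those satisfying q"
def pvSpec (q : String → Bool) (l : List String) (a : String) : Prop :=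
  ∃ u v, l = u ++ a :: v ∧ q a = true ∧ (∀ y ∈ u, q y = true → pvKey a < pvKey y) ∧
    (∀ y ∈ v, q y = true → pvKey a ≤ pvKey y)

-- "a is the first entry of l with minimal rank"
def pvSpecR (l : List String) (a : String) : Prop :=
  ∃ u v, l = u ++ a :: v ∧ (∀ y ∈ u, pvR a < pvR y) ∧ (∀ y ∈ v, pvR a ≤ pvR y)

lemma pvKey_lt_iff (a b : String) :
    pvKey a < pvKey b ↔ (pvDepth a < pvDepth b ∨ (pvDepth a = pvDepth b ∧ pvLow a < pvLow b)) := by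
  rw [pvKey, pvKey]; exact Prod.Lex.toLex_lt_toLex

lemma pvKeyI_lt_iff (c d : ℤ × String) :
    pvKeyI c < pvKeyI d ↔ (pvKey c.2 < pvKey d.2 ∨ (pvKey c.2 = pvKey d.2 ∧ c.1 < d.1)) := by
  rw [pvKeyI, pvKeyI]; exact Prod.Lex.toLex_lt_toLex

lemma pvKeyI_eq_iff (c d : ℤ × String) :
    pvKeyI c = pvKeyI d ↔ (pvKey c.2 = pvKey d.2 ∧ c.1 = d.1) := by
  rw [pvKeyI, pvKeyI, toLex_inj, Prod.ext_iff]

lemma pvBefore_eq :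
    (fun a b => decide (pvDepth a < pvDepth b) || (!decide (pvDepth b < pvDepth a) && decide (pvLow a < pvLow b)))
      = (fun a b : String => decide (pvKey a < pvKey b)) := by
  funext a b
  have hiff : (pvKey a < pvKey b) ↔ ((pvDepth a < pvDepth b) ∨ (¬ (pvDepth b < pvDepth a) ∧ pvLow a < pvLow b)) := by
    rw [pvKey_lt_iff]
    constructor
    · rintro (h | ⟨h, h2⟩)
      · exact Or.inl h
      · exact Or.inr ⟨by omega, h2⟩
    · rintro (h | ⟨h, h2⟩)
      · exact Or.inl h
      · rcases Nat.lt_trichotomy (pvDepth a) (pvDepth b) with h3 | h3 | h3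
        · exact Or.inl h3
        · exact Or.inr ⟨h3, h2⟩
        · exact absurd h3 h
  rw [(decide_eq_decide.mpr hiff :
    (decide (pvKey a < pvKey b) : Bool) = decide ((pvDepth a < pvDepth b) ∨ (¬ (pvDepth b < pvDepth a) ∧ pvLow a < pvLow b)))]
  have hle : (decide (pvDepth a ≤ pvDepth b) : Bool) = !decide (pvDepth b < pvDepth a) := by
    rw [← decide_not]; exact decide_eq_decide.mpr (by omega)
  simp [Bool.decide_or, Bool.decide_and, hle]

lemma pvSorted2_eq (l : List String) :
    PySem.List.sorted2 l pvDepth pvLow = PySem.List.sorted l pvKey := by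
  rw [PySem.List.sorted_eq_foldl_insertBy]
  show List.foldl (fun acc x => PySem.List.insertBy
      (fun a b => decide (pvDepth a < pvDepth b) || (!decide (pvDepth b < pvDepth a) && decide (pvLow a < pvLow b))) x acc) [] l = _
  rw [pvBefore_eq]

lemma pvInsertBy_snd (i : ℤ) (x : String) :
    ∀ (acc : List (ℤ × String)), (∀ c ∈ acc, c.1 < i) →
      (PySem.List.insertBy (fun a b => decide (pvKeyI a < pvKeyI b)) (i, x) acc).map (·.2)
        = PySem.List.insertBy (fun a b => decide (pvKey a < pvKey b)) x (acc.map (·.2)) := by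
  intro acc
  induction acc with
  | nil => intro _; simp [PySem.List.insertBy]
  | cons c cs ih =>
    intro hlt
    have hc : c.1 < i := hlt c (List.mem_cons_self)
    have deq : (decide (pvKeyI (i, x) < pvKeyI c) : Bool) = decide (pvKey x < pvKey c.2) := by
      apply decide_eq_decide.mpr
      rw [pvKeyI_lt_iff]
      constructor
      · rintro (h | ⟨h, h2⟩)
        · exact h
        · exact absurd h2 (by simp; omega)
      · exact fun h => Or.inl h
    simp only [PySem.List.insertBy, List.map_cons]
    simp only [deq]
    by_cases h : pvKey x < pvKey c.2
    · simp [h]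
    · simp only [h, decide_false, Bool.false_eq_true, if_false, List.map_cons]
      rw [ih (fun e he => hlt e (List.mem_cons_of_mem _ he))]

lemma pvEnumFoldl (l : List String) :
    ∀ (s : ℤ) (acc : List (ℤ × String)), (∀ c ∈ acc, c.1 < s) →
      ((PySem.List.enumerate l s).foldl (fun a c => PySem.List.insertBy (fun a b => decide (pvKeyI a < pvKeyI b)) c a) acc).map (·.2)
        = l.foldl (fun a x => PySem.List.insertBy (fun a b => decide (pvKey a < pvKey b)) x a) (acc.map (·.2)) := by
  induction l with
  | nil => intro s acc _; simp [PySem.List.enumerate]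
  | cons y l ih =>
    intro s acc hlt
    rw [PySem.List.enumerate_cons]
    simp only [List.foldl_cons]
    rw [ih (s + 1) _ (by
      intro e he
      rcases (PySem.List.mem_insertBy _ _ _ _).mp he with h | h
      · subst h; omega
      · have := hlt e h; omega)]
    rw [pvInsertBy_snd s y acc hlt]

lemma pvSortedA_eq (l : List String) :
    PySem.List.sorted l pvKey = (PySem.List.sorted (PySem.List.enumerate l 0) pvKeyI).map (·.2) := by
  rw [PySem.List.sorted_eq_foldl_insertBy, PySem.List.sorted_eq_foldl_insertBy]
  have h := pvEnumFoldl l 0 [] (by simp)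
  simpa using h.symm

lemma pvSortedP_pairwise (l : List String) :
    (PySem.List.sorted (PySem.List.enumerate l 0) pvKeyI).Pairwise (fun c d => pvKeyI c < pvKeyI d) := by
  have hle := PySem.List.sorted_pairwise (PySem.List.enumerate l 0) pvKeyI
  have hperm := PySem.List.sorted_perm (PySem.List.enumerate l 0) pvKeyI false
  have hnd : ((PySem.List.enumerate l 0).map (fun c => c.1)).Nodup := by
    rw [PySem.List.map_fst_enumerate]
    exact PySem.List.nodup_pyRange_one _ _
  have hnd' : ((PySem.List.sorted (PySem.List.enumerate l 0) pvKeyI).map (fun c => c.1)).Nodup :=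
    ((hperm.map (fun c => c.1)).nodup_iff).mpr hnd
  have hpne : (PySem.List.sorted (PySem.List.enumerate l 0) pvKeyI).Pairwise (fun c d => c.1 ≠ d.1) :=
    List.pairwise_map.mp hnd'
  have hinj : ∀ c d : ℤ × String, pvKeyI c = pvKeyI d → c.1 = d.1 := by
    intro c d h
    rw [pvKeyI, pvKeyI] at h
    have h2 := congrArg (fun z => (ofLex z).2) h
    simpa using h2
  exact (hle.and hpne).imp (fun {c d} h => lt_of_le_of_ne h.1 (fun he => h.2 (hinj c d he)))

lemma pvFind?_first_min {β κ : Type} [LinearOrder κ] (F : β → κ) (q : β → Bool) :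
    ∀ l : List β, l.Pairwise (fun a b => F a < F b) → ∀ M, M ∈ l → q M = true →
      (∀ c ∈ l, q c = true → F M ≤ F c) → l.find? q = some M := by
  intro l
  induction l with
  | nil => intro _ M hM; exact absurd hM (List.not_mem_nil)
  | cons h t ih =>
    intro hpw M hM hq hmin
    cases hqh : q h with
    | true =>
      have hhM : h = M := by
        rcases List.mem_cons.mp hM with he | ht
        · exact he.symm
        · exfalso
          have hlt : F h < F M := (List.pairwise_cons.mp hpw).1 M ht
          have hle : F M ≤ F h := hmin h List.mem_cons_self hqh
          exact absurd hlt (not_lt.mpr hle)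
      rw [List.find?_cons_of_pos hqh, hhM]
    | false =>
      have hMt : M ∈ t := by
        rcases List.mem_cons.mp hM with he | ht
        · exact absurd (he ▸ hq) (by simp [hqh])
        · exact ht
      rw [List.find?_cons_of_neg (by simp [hqh])]
      exact ih (List.pairwise_cons.mp hpw).2 M hMt hq
        (fun c hc hqc => hmin c (List.mem_cons_of_mem _ hc) hqc)

lemma pvLoopSome (q : String → Bool) (l : List String) (y : String) (hy : y ∈ l) (hq : q y = true) :
    ∃ M, PySem.List.min? ((PySem.List.enumerate l 0).filter (fun c => q c.2)) pvKeyI = some M ∧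
      (PySem.List.sorted l pvKey).find? q = some M.2 := by
  obtain ⟨k, hk, hky⟩ := List.mem_iff_getElem.mp hy
  have henum : ((0 : ℤ) + ↑k, l[k]) ∈ PySem.List.enumerate l 0 :=
    (PySem.List.mem_enumerate_iff l 0 _).mpr ⟨k, hk, rfl⟩
  have hflt : ((0 : ℤ) + ↑k, l[k]) ∈ (PySem.List.enumerate l 0).filter (fun c => q c.2) := by
    rw [List.mem_filter]
    exact ⟨henum, by simpa [hky] using hq⟩
  cases hmin : PySem.List.min? ((PySem.List.enumerate l 0).filter (fun c => q c.2)) pvKeyI with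
  | none =>
    exact absurd ((PySem.List.min?_eq_none_iff _ _).mp hmin) (List.ne_nil_of_mem hflt)
  | some M =>
    refine ⟨M, rfl, ?_⟩
    have hMf := PySem.List.min?_mem hmin
    have hMenum : M ∈ PySem.List.enumerate l 0 := (List.mem_filter.mp hMf).1
    have hMq : q M.2 = true := (List.mem_filter.mp hMf).2
    have hfind := pvFind?_first_min pvKeyI (fun c => q c.2)
      (PySem.List.sorted (PySem.List.enumerate l 0) pvKeyI) (pvSortedP_pairwise l) M
      ((PySem.List.mem_sorted _ _ _ _).mpr hMenum) hMq
      (fun c hc hqc => PySem.List.min?_isMin hmin c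
        (List.mem_filter.mpr ⟨(PySem.List.mem_sorted _ _ _ _).mp hc, hqc⟩))
    rw [pvSortedA_eq, List.find?_map]
    have : (List.find? (q ∘ fun c => c.2) (PySem.List.sorted (PySem.List.enumerate l 0) pvKeyI))
        = some M := hfind
    rw [this]
    rfl

lemma pvLoopNone (q : String → Bool) (l : List String) (h : ∀ y ∈ l, q y = false) :
    (PySem.List.sorted l pvKey).find? q = none := by
  rw [pvSortedA_eq, List.find?_map]
  have : List.find? (q ∘ fun c => c.2) (PySem.List.sorted (PySem.List.enumerate l 0) pvKeyI) = none := by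
    rw [List.find?_eq_none]
    intro c hc
    have hce : c ∈ PySem.List.enumerate l 0 := (PySem.List.mem_sorted _ _ _ _).mp hc
    obtain ⟨k, hk, hck⟩ := (PySem.List.mem_enumerate_iff l 0 c).mp hce
    have : c.2 ∈ l := by rw [hck]; exact List.getElem_mem hk
    simp [Function.comp, h c.2 this]
  rw [this]
  rfl

lemma pvSpec_of_min (q : String → Bool) (l : List String) (M : ℤ × String)
    (hmin : PySem.List.min? ((PySem.List.enumerate l 0).filter (fun c => q c.2)) pvKeyI = some M) :
    pvSpec q l M.2 := by
  have hMf := PySem.List.min?_mem hmin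
  have hMenum : M ∈ PySem.List.enumerate l 0 := (List.mem_filter.mp hMf).1
  have hMq : q M.2 = true := (List.mem_filter.mp hMf).2
  have hisMin := PySem.List.min?_isMin hmin
  obtain ⟨k, hk, hMk⟩ := (PySem.List.mem_enumerate_iff l 0 M).mp hMenum
  have hM1 : M.1 = (k : ℤ) := by rw [hMk]; simp
  have hM2 : M.2 = l[k] := by rw [hMk]
  refine ⟨l.take k, l.drop (k + 1), ?_, hMq, ?_, ?_⟩
  · conv_lhs => rw [← List.take_append_drop k l, List.drop_eq_getElem_cons hk]
    rw [hM2]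
  · intro y hy hqy
    obtain ⟨j, hj, hyj⟩ := List.mem_take_iff_getElem.mp hy
    have hjk : j < k := lt_of_lt_of_le hj (min_le_left _ _)
    have hjl : j < l.length := lt_of_lt_of_le hj (min_le_right _ _)
    have henum : ((0 : ℤ) + ↑j, l[j]) ∈ PySem.List.enumerate l 0 :=
      (PySem.List.mem_enumerate_iff l 0 _).mpr ⟨j, hjl, rfl⟩
    have hle := hisMin ((0 : ℤ) + ↑j, l[j])
      (List.mem_filter.mpr ⟨henum, by simpa [hyj] using hqy⟩)
    rcases eq_or_lt_of_le hle with he | hlt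
    · exfalso
      have h1 := ((pvKeyI_eq_iff _ _).mp he).2
      rw [hM1] at h1
      simp at h1
      omega
    · rcases (pvKeyI_lt_iff _ _).mp hlt with h1 | ⟨_, h2⟩
      · rw [← hyj]; exact (by simpa using h1)
      · exfalso
        rw [hM1] at h2
        simp at h2
        omega
  · intro y hy hqy
    obtain ⟨j, hj, hyj⟩ := List.mem_drop_iff_getElem.mp hy
    have hjl : (k + 1) + j < l.length := by omega
    have henum : ((0 : ℤ) + ↑((k + 1) + j), l[(k + 1) + j]) ∈ PySem.List.enumerate l 0 :=
      (PySem.List.mem_enumerate_iff l 0 _).mpr ⟨(k + 1) + j, hjl, rfl⟩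
    have hle := hisMin ((0 : ℤ) + ↑((k + 1) + j), l[(k + 1) + j])
      (List.mem_filter.mpr ⟨henum, by simpa [hyj] using hqy⟩)
    rw [← hyj]
    rcases eq_or_lt_of_le hle with he | hlt
    · exact le_of_eq (by simpa using ((pvKeyI_eq_iff _ _).mp he).1)
    · rcases (pvKeyI_lt_iff _ _).mp hlt with h1 | ⟨h2, _⟩
      · exact le_of_lt (by simpa using h1)
      · exact le_of_eq (by simpa using h2)

lemma pvFilterSplit (q : String → Bool) :
    ∀ (l u' : List String) (a : String) (v' : List String), l.filter q = u' ++ a :: v' →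
      ∃ u v, l = u ++ a :: v ∧ u.filter q = u' ∧ v.filter q = v' := by
  intro l
  induction l with
  | nil => intro u' a v' h; simp at h
  | cons x t ih =>
    intro u' a v' h
    cases hqx : q x with
    | true =>
      rw [List.filter_cons_of_pos hqx] at h
      cases u' with
      | nil =>
        simp at h
        exact ⟨[], t, by rw [h.1]; simp, by simp, h.2⟩
      | cons z u'' =>
        have hz : z = x := (List.cons.injEq _ _ _ _).mp h |>.1.symm
        obtain ⟨u, v, h1, h2, h3⟩ := ih u'' a v' ((List.cons.injEq _ _ _ _).mp h).2
        exact ⟨x :: u, v, by rw [h1]; simp, by rw [List.filter_cons_of_pos hqx, h2, hz], h3⟩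
    | false =>
      rw [List.filter_cons_of_neg (by simp [hqx])] at h
      obtain ⟨u, v, h1, h2, h3⟩ := ih u' a v' h
      exact ⟨x :: u, v, by rw [h1]; simp, by rw [List.filter_cons_of_neg (by simp [hqx]), h2], h3⟩

lemma pvSpecLift (q : String → Bool) (l : List String) (a : String)
    (h : pvSpec (fun _ => true) (l.filter q) a) : pvSpec q l a := by
  obtain ⟨u', v', hsplit, _, hu', hv'⟩ := h
  obtain ⟨u, v, h1, h2, h3⟩ := pvFilterSplit q l u' a v' hsplit
  have hqa : q a = true := by
    have : a ∈ l.filter q := by rw [hsplit]; simp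
    exact (List.mem_filter.mp this).2
  refine ⟨u, v, h1, hqa, ?_, ?_⟩
  · intro y hy hqy
    exact hu' y (by rw [← h2]; exact List.mem_filter.mpr ⟨hy, hqy⟩) rfl
  · intro y hy hqy
    exact hv' y (by rw [← h3]; exact List.mem_filter.mpr ⟨hy, hqy⟩) rfl

lemma pvRankLt_eq (a b : Nat × Nat × String) : pvRankLt a b = decide (pvRkL a < pvRkL b) := by
  have hiff : (pvRkL a < pvRkL b) ↔ (a.1 < b.1 ∨ a.1 = b.1 ∧ (a.2.1 < b.2.1 ∨ a.2.1 = b.2.1 ∧ a.2.2 < b.2.2)) := by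
    rw [pvRkL, pvRkL, Prod.Lex.toLex_lt_toLex, Prod.Lex.toLex_lt_toLex]
  rw [pvRankLt]
  simp only [hiff, Bool.decide_or, Bool.decide_and, Bool.beq_eq_decide_eq]

lemma pvFoldMin (l : List String) : ∀ (x : String),
    ∃ r u v, (l.foldl (fun bb p =>
        let k := pvRank p
        if pvRankLt k bb.2 then (p, k) else bb) (x, pvRank x)) = (r, pvRank r)
      ∧ x :: l = u ++ r :: v ∧ (∀ y ∈ u, pvR r < pvR y) ∧ (∀ y ∈ v, pvR r ≤ pvR y) := by
  induction l with
  | nil =>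
    intro x
    exact ⟨x, [], [], by simp, rfl, by simp, by simp⟩
  | cons p t ih =>
    intro x
    have hstep : (List.foldl (fun bb p =>
        let k := pvRank p
        if pvRankLt k bb.2 then (p, k) else bb) (x, pvRank x) (p :: t))
        = (List.foldl (fun bb p =>
        let k := pvRank p
        if pvRankLt k bb.2 then (p, k) else bb)
          ((if pvRankLt (pvRank p) (pvRank x) then p else x),
            pvRank (if pvRankLt (pvRank p) (pvRank x) then p else x)) t) := by
      rw [List.foldl_cons]
      by_cases h : pvRankLt (pvRank p) (pvRank x) = true
      · simp [h]
      · simp [h]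
    by_cases hlt : pvRankLt (pvRank p) (pvRank x) = true
    · -- p beats x
      have hRpx : pvR p < pvR x := by
        rw [pvRankLt_eq] at hlt
        rw [pvR, pvR]
        exact of_decide_eq_true hlt
      obtain ⟨r, u, v, hfold, hsplit, hu, hv⟩ := ih p
      rw [hstep]
      simp only [hlt, if_true]
      cases u with
      | nil =>
        simp at hsplit
        refine ⟨r, [x], v, hfold, ?_, ?_, hv⟩
        · rw [hsplit.2, ← hsplit.1]; rfl
        · intro y hy
          simp at hy
          rw [hy, ← hsplit.1]
          exact hRpx
      | cons z u' =>
        have hz : z = p := by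
          have := hsplit
          simp at this
          exact this.1.symm
        have hpu : p ∈ z :: u' := by rw [hz]; exact List.mem_cons_self
        have ht : t = u' ++ r :: v := by
          have := hsplit
          rw [hz] at this
          exact (List.cons.injEq _ _ _ _).mp this |>.2
        refine ⟨r, x :: z :: u', v, hfold, ?_, ?_, hv⟩
        · rw [ht, hz]; rfl
        · intro y hy
          rcases List.mem_cons.mp hy with he | hy'
          · rw [he]
            exact lt_trans (hu p hpu) hRpx
          · exact hu y hy'
    · -- x stays
      have hRxp : pvR x ≤ pvR p := by
        rw [pvRankLt_eq] at hlt
        simp at hlt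
        rw [pvR, pvR]
        exact hlt
      obtain ⟨r, u, v, hfold, hsplit, hu, hv⟩ := ih x
      rw [hstep]
      simp only [hlt, if_false, Bool.false_eq_true]
      cases u with
      | nil =>
        simp at hsplit
        refine ⟨r, [], p :: v, hfold, ?_, by simp, ?_⟩
        · rw [hsplit.2, ← hsplit.1]; rfl
        · intro y hy
          rcases List.mem_cons.mp hy with he | hy'
          · rw [he, ← hsplit.1]
            exact hRxp
          · exact hv y hy'
      | cons z u' =>
        have hz : z = x := by
          have := hsplit
          simp at this
          exact this.1.symm
        have hxu : x ∈ z :: u' := by rw [hz]; exact List.mem_cons_self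
        have ht : t = u' ++ r :: v := by
          have := hsplit
          rw [hz] at this
          exact (List.cons.injEq _ _ _ _).mp this |>.2
        refine ⟨r, z :: p :: u', v, hfold, ?_, ?_, hv⟩
        · rw [ht, hz]; rfl
        · intro y hy
          rcases List.mem_cons.mp hy with he | hy'
          · rw [he, hz]
            exact hu x hxu
          · rcases List.mem_cons.mp hy' with he' | hy''
            · rw [he']
              exact lt_of_lt_of_le (hu x hxu) hRxp
            · exact hu y (List.mem_cons_of_mem _ hy'')

lemma pvSpecR_aux {a b : String} {u1 v1 u2 v2 : List String}
    (h2 : u1 ++ a :: v1 = u2 ++ b :: v2)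
    (hv1 : ∀ y ∈ v1, pvR a ≤ pvR y) (hu2 : ∀ y ∈ u2, pvR b < pvR y)
    (hlen : u1.length < u2.length) : False := by
  have hbv : b ∈ v1 := by
    have hdrop : (u1 ++ a :: v1).drop (u1.length + 1) = v1 := by
      rw [show u1 ++ a :: v1 = (u1 ++ [a]) ++ v1 by simp]
      rw [show u1.length + 1 = (u1 ++ [a]).length by simp]
      exact List.drop_left
    have hblen : u2.length < (u1 ++ a :: v1).length := by
      rw [h2]; simp
    have hbe : (u1 ++ a :: v1)[u2.length]'hblen = b := by
      simp only [h2]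
      simp
    rw [← hdrop, List.mem_drop_iff_getElem]
    refine ⟨u2.length - (u1.length + 1), by simp at hblen ⊢; omega, ?_⟩
    simp only [show u1.length + 1 + (u2.length - (u1.length + 1)) = u2.length from by omega]
    exact hbe
  have hau : a ∈ u2 := by
    have htake : (u2 ++ b :: v2).take u2.length = u2 := List.take_left
    have halen : u1.length < (u1 ++ a :: v1).length := by simp
    have hae : (u1 ++ a :: v1)[u1.length]'halen = a := by simp
    rw [← htake, List.mem_take_iff_getElem]
    refine ⟨u1.length, by rw [← h2]; simp at halen ⊢; omega, ?_⟩
    simp only [← h2]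
    exact hae
  exact absurd (lt_of_le_of_lt (hv1 b hbv) (hu2 a hau)) (lt_irrefl _)

lemma pvSpecR_unique {l : List String} {a b : String} (ha : pvSpecR l a) (hb : pvSpecR l b) : a = b := by
  obtain ⟨u1, v1, h1, hu1, hv1⟩ := ha
  obtain ⟨u2, v2, h2, hu2, hv2⟩ := hb
  have he : u1 ++ a :: v1 = u2 ++ b :: v2 := by rw [← h1, ← h2]
  rcases Nat.lt_trichotomy u1.length u2.length with h | h | h
  · exact absurd (pvSpecR_aux he hv1 hu2 h) (fun f => f)
  · have := List.append_inj he h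
    exact ((List.cons.injEq _ _ _ _).mp this.2).1
  · exact absurd (pvSpecR_aux he.symm hv2 hu1 h) (fun f => f)

lemma pvRank1 {p : String} (h : pvQ1 p = true) : pvRank p = (1, pvDepth p, pvLow p) := by
  rw [pvRank]; rw [pvQ1] at h; simp only [h, if_true, List.contains_eq_mem] at *
lemma pvRank2 {p : String} (h1 : pvQ1 p = false) (h2 : pvQ2 p = true) :
    pvRank p = (2, pvDepth p, pvLow p) := by
  rw [pvRank]; rw [pvQ1] at h1; rw [pvQ2] at h2; split_ifs <;> simp_all
lemma pvRank3 {p : String} (h1 : pvQ1 p = false) (h2 : pvQ2 p = false) (h3 : pvQ3 p = true) :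
    pvRank p = (3, pvDepth p, pvLow p) := by
  rw [pvRank]; rw [pvQ1] at h1; rw [pvQ2] at h2; rw [pvQ3] at h3; split_ifs <;> simp_all
lemma pvRank4 {p : String} (h1 : pvQ1 p = false) (h2 : pvQ2 p = false) (h3 : pvQ3 p = false)
    (h4 : pvQ4 p = true) : pvRank p = (4, pvDepth p, pvLow p) := by
  rw [pvRank]; rw [pvQ1] at h1; rw [pvQ2] at h2; rw [pvQ3] at h3; rw [pvQ4] at h4
  split_ifs <;> simp_all
lemma pvRank5 {p : String} (h1 : pvQ1 p = false) (h2 : pvQ2 p = false) (h3 : pvQ3 p = false)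
    (h4 : pvQ4 p = false) : pvRank p = (5, 0, "") := by
  rw [pvRank]; rw [pvQ1] at h1; rw [pvQ2] at h2; rw [pvQ3] at h3; rw [pvQ4] at h4
  split_ifs <;> simp_all

lemma pvRankFst1 {p : String} (h : pvQ1 p = false) : 2 ≤ (pvRank p).1 := by
  rw [pvRank]; rw [pvQ1] at h; split_ifs <;> simp_all
lemma pvRankFst2 {p : String} (h1 : pvQ1 p = false) (h2 : pvQ2 p = false) : 3 ≤ (pvRank p).1 := by
  rw [pvRank]; rw [pvQ1] at h1; rw [pvQ2] at h2; split_ifs <;> simp_all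
lemma pvRankFst3 {p : String} (h1 : pvQ1 p = false) (h2 : pvQ2 p = false) (h3 : pvQ3 p = false) :
    4 ≤ (pvRank p).1 := by
  rw [pvRank]; rw [pvQ1] at h1; rw [pvQ2] at h2; rw [pvQ3] at h3; split_ifs <;> simp_all
lemma pvRkL_lt_of_fst_lt {k k' : ℕ × ℕ × String} (h : k.1 < k'.1) : pvRkL k < pvRkL k' := by
  rcases k with ⟨t, d, s⟩; rcases k' with ⟨t', d', s'⟩
  exact Prod.Lex.toLex_lt_toLex.mpr (Or.inl h)
lemma pvR_lt_of_fst_lt {p q : String} (h : (pvRank p).1 < (pvRank q).1) : pvR p < pvR q := by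
  rw [pvR, pvR]
  exact pvRkL_lt_of_fst_lt h
lemma pvR_lt_iff {p q : String} {t : ℕ} (hp : pvRank p = (t, pvDepth p, pvLow p))
    (hq : pvRank q = (t, pvDepth q, pvLow q)) : (pvR p < pvR q ↔ pvKey p < pvKey q) := by
  rw [pvR, pvR, pvRkL, pvRkL, hp, hq, pvKey, pvKey]
  simp only [Prod.Lex.toLex_lt_toLex]
  simp

lemma pvSpecR_of_spec (q : String → Bool) (t : ℕ) (l : List String) (a : String)
    (hsp : pvSpec q l a)
    (hq : ∀ y ∈ l, q y = true → pvRank y = (t, pvDepth y, pvLow y))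
    (hnq : ∀ y ∈ l, q y = false → t < (pvRank y).1) : pvSpecR l a := by
  obtain ⟨u, v, hsplit, hqa, hu, hv⟩ := hsp
  have ha : a ∈ l := by rw [hsplit]; simp
  have hra := hq a ha hqa
  have hle : ∀ y ∈ l, q y = true → pvKey a ≤ pvKey y → pvR a ≤ pvR y := by
    intro y hy hqy hk
    have hry := hq y hy hqy
    rcases lt_or_eq_of_le hk with hlt | heq
    · exact le_of_lt ((pvR_lt_iff hra hry).mpr hlt)
    · have hc : pvDepth a = pvDepth y ∧ pvLow a = pvLow y := by
        rw [pvKey, pvKey, toLex_inj, Prod.ext_iff] at heq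
        exact heq
      have : pvRank a = pvRank y := by rw [hra, hry, hc.1, hc.2]
      rw [pvR, pvR, this]
  refine ⟨u, v, hsplit, ?_, ?_⟩
  · intro y hy
    have hyl : y ∈ l := by rw [hsplit]; exact List.mem_append_left _ hy
    cases hqy : q y with
    | true => exact (pvR_lt_iff hra (hq y hyl hqy)).mpr (hu y hy hqy)
    | false =>
      apply pvR_lt_of_fst_lt
      rw [hra]
      exact hnq y hyl hqy
  · intro y hy
    have hyl : y ∈ l := by
      rw [hsplit]
      exact List.mem_append_right _ (List.mem_cons_of_mem _ hy)
    cases hqy : q y with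
    | true => exact hle y hyl hqy (hv y hy hqy)
    | false =>
      apply le_of_lt
      apply pvR_lt_of_fst_lt
      rw [hra]
      exact hnq y hyl hqy

lemma pvSpecR_head (x : String) (xs : List String)
    (h : ∀ y ∈ x :: xs, pvQ1 y = false ∧ pvQ2 y = false ∧ pvQ3 y = false ∧ pvQ4 y = false) :
    pvSpecR (x :: xs) x := by
  have hx := h x List.mem_cons_self
  refine ⟨[], xs, rfl, by simp, ?_⟩
  intro y hy
  have hyy := h y (List.mem_cons_of_mem _ hy)
  rw [pvR, pvR, pvRank5 hx.1 hx.2.1 hx.2.2.1 hx.2.2.2, pvRank5 hyy.1 hyy.2.1 hyy.2.2.1 hyy.2.2.2]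

-- ===== VERDICT (by name: the statement is the Claim_ definition above) =====
theorem pick_default_entry_spec : Claim_equal_pick_default_entry := by
  intro entries _
  unfold Spec_pick_default_entry
  cases entries with
  | nil => rfl
  | cons x xs =>
    obtain ⟨r, u, v, hfold, hsplit, hu, hv⟩ := pvFoldMin xs x
    have hB : pick_default_entry_alt (x :: xs) = some r := by
      simp only [pick_default_entry_alt]
      rw [hfold]
    have hBspec : pvSpecR (x :: xs) r := ⟨u, v, hsplit, hu, hv⟩
    rw [hB]
    by_cases h1 : ∃ y ∈ x :: xs, pvQ1 y = true
    · obtain ⟨y, hy, hqy⟩ := h1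
      obtain ⟨M, hmin, hfind⟩ := pvLoopSome pvQ1 (x :: xs) y hy hqy
      have hA : pick_default_entry (x :: xs) = some M.2 := by
        simp only [pick_default_entry, pvSorted2_eq, hfind]
      rw [hA]
      have hMspec := pvSpecR_of_spec pvQ1 1 _ _ (pvSpec_of_min pvQ1 _ M hmin)
        (fun z _ hq => pvRank1 hq)
        (fun z _ hq => by have := pvRankFst1 (p := z) hq; omega)
      exact congrArg some (pvSpecR_unique hMspec hBspec)
    · have h1' : ∀ y ∈ x :: xs, pvQ1 y = false := by
        intro y hy
        cases hq : pvQ1 y with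
        | false => rfl
        | true => exact absurd ⟨y, hy, hq⟩ h1
      have hfind1 := pvLoopNone pvQ1 (x :: xs) h1'
      by_cases h2 : ∃ y ∈ x :: xs, pvQ2 y = true
      · obtain ⟨y, hy, hqy⟩ := h2
        obtain ⟨M, hmin, hfind⟩ := pvLoopSome pvQ2 (x :: xs) y hy hqy
        have hA : pick_default_entry (x :: xs) = some M.2 := by
          simp only [pick_default_entry, pvSorted2_eq, hfind1, hfind]
        rw [hA]
        have hMspec := pvSpecR_of_spec pvQ2 2 _ _ (pvSpec_of_min pvQ2 _ M hmin)
          (fun z hz hq => pvRank2 (h1' z hz) hq)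
          (fun z hz hq => by have := pvRankFst2 (h1' z hz) hq; omega)
        exact congrArg some (pvSpecR_unique hMspec hBspec)
      · have h2' : ∀ y ∈ x :: xs, pvQ2 y = false := by
          intro y hy
          cases hq : pvQ2 y with
          | false => rfl
          | true => exact absurd ⟨y, hy, hq⟩ h2
        have hfind2 := pvLoopNone pvQ2 (x :: xs) h2'
        by_cases h3 : ∃ y ∈ x :: xs, pvQ3 y = true
        · obtain ⟨y, hy, hqy⟩ := h3
          have hyf : y ∈ (x :: xs).filter pvQ3 := List.mem_filter.mpr ⟨hy, hqy⟩
          obtain ⟨M, hmin, hfind⟩ :=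
            pvLoopSome (fun _ => true) ((x :: xs).filter pvQ3) y hyf rfl
          cases hs : PySem.List.sorted ((x :: xs).filter pvQ3) pvKey with
          | nil => rw [hs] at hfind; simp at hfind
          | cons p rest =>
            have hpM : p = M.2 := by
              rw [hs, List.find?_cons_of_pos rfl] at hfind
              exact (Option.some.injEq _ _).mp hfind
            have hA : pick_default_entry (x :: xs) = some p := by
              simp only [pick_default_entry, pvSorted2_eq, hfind1, hfind2, hs]
            rw [hA, hpM]
            have hMspec := pvSpecR_of_spec pvQ3 3 _ _
              (pvSpecLift pvQ3 (x :: xs) M.2 (pvSpec_of_min (fun _ => true) _ M hmin))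
              (fun z hz hq => pvRank3 (h1' z hz) (h2' z hz) hq)
              (fun z hz hq => by have := pvRankFst3 (h1' z hz) (h2' z hz) hq; omega)
            exact congrArg some (pvSpecR_unique hMspec hBspec)
        · have h3' : ∀ y ∈ x :: xs, pvQ3 y = false := by
            intro y hy
            cases hq : pvQ3 y with
            | false => rfl
            | true => exact absurd ⟨y, hy, hq⟩ h3
          have hf3 : (x :: xs).filter pvQ3 = [] := by
            rw [List.filter_eq_nil_iff]
            intro y hy
            simp [h3' y hy]
          have hs3 : PySem.List.sorted ((x :: xs).filter pvQ3) pvKey = [] := by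
            rw [hf3]
            exact (PySem.List.sorted_eq_nil_iff _ _ _).mpr rfl
          by_cases h4 : ∃ y ∈ x :: xs, pvQ4 y = true
          · obtain ⟨y, hy, hqy⟩ := h4
            have hyf : y ∈ (x :: xs).filter pvQ4 := List.mem_filter.mpr ⟨hy, hqy⟩
            obtain ⟨M, hmin, hfind⟩ :=
              pvLoopSome (fun _ => true) ((x :: xs).filter pvQ4) y hyf rfl
            cases hs : PySem.List.sorted ((x :: xs).filter pvQ4) pvKey with
            | nil => rw [hs] at hfind; simp at hfind
            | cons p rest =>
              have hpM : p = M.2 := by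
                rw [hs, List.find?_cons_of_pos rfl] at hfind
                exact (Option.some.injEq _ _).mp hfind
              have hA : pick_default_entry (x :: xs) = some p := by
                simp only [pick_default_entry, pvSorted2_eq, hfind1, hfind2, hs3, hs]
              rw [hA, hpM]
              have hMspec := pvSpecR_of_spec pvQ4 4 _ _
                (pvSpecLift pvQ4 (x :: xs) M.2 (pvSpec_of_min (fun _ => true) _ M hmin))
                (fun z hz hq => pvRank4 (h1' z hz) (h2' z hz) (h3' z hz) hq)
                (fun z hz hq => by
                  have h5 := pvRank5 (h1' z hz) (h2' z hz) (h3' z hz) hq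
                  rw [h5]; norm_num)
              exact congrArg some (pvSpecR_unique hMspec hBspec)
          · have h4' : ∀ y ∈ x :: xs, pvQ4 y = false := by
              intro y hy
              cases hq : pvQ4 y with
              | false => rfl
              | true => exact absurd ⟨y, hy, hq⟩ h4
            have hf4 : (x :: xs).filter pvQ4 = [] := by
              rw [List.filter_eq_nil_iff]
              intro y hy
              simp [h4' y hy]
            have hs4 : PySem.List.sorted ((x :: xs).filter pvQ4) pvKey = [] := by
              rw [hf4]
              exact (PySem.List.sorted_eq_nil_iff _ _ _).mpr rfl
            have hA : pick_default_entry (x :: xs) = some x := by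
              simp only [pick_default_entry, pvSorted2_eq, hfind1, hfind2, hs3, hs4]
            rw [hA]
            have hxspec := pvSpecR_head x xs
              (fun y hy => ⟨h1' y hy, h2' y hy, h3' y hy, h4' y hy⟩)
            exact congrArg some (pvSpecR_unique hxspec hBspec)
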